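-- pv_equiv track=rewrite | github.com/HHHong10/python_basic | 01.문자열,해싱/아나그램.py | solution
-- ===== SOURCE A (Python) =====
-- import collections
--
-- def solution(s1, s2):
--     H1 = collections.Counter(s1)
--
--     for s in s2:
--         if s in H1:
--             H1[s] -= 1
--             if H1[s] == 0:
--                 del H1[s]
--
--     if not H1:
--         return "TES"
--     else:
--         return "NO"
-- ===== SOURCE B (Python) =====
-- import collections
--
-- def solution(s1, s2):
--     c1 = collections.Counter(s1)
--     c2 = collections.Counter(s2)
--     return "TES" if all(c2[k] >= v for k, v in c1.items()) else "NO"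
-- ===== Notes on version B (the rewrite author's own statement) =====
-- stated objective: idiomatic
-- what changed: B builds both frequency counters up front and returns the result of one multiset-subset comparison, instead of A's loop that mutates s1's counter by decrement-and-delete and then tests emptiness.
import Mathlib
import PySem

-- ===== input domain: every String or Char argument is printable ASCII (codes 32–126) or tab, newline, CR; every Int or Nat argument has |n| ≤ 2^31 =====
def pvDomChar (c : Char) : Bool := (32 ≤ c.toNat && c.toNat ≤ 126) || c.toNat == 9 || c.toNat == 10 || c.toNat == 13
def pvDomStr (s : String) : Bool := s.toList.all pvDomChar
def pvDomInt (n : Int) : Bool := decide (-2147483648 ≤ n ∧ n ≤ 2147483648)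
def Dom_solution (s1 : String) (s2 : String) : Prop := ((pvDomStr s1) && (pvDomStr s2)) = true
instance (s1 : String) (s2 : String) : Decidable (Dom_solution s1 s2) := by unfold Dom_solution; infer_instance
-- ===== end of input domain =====

-- B replaces A's decrement-and-delete mutation loop by building both frequency counters
-- up front and doing one multiset-subset comparison (idiomatic; same asymptotic cost).


-- ===== PORT A =====
-- one iteration of A's `for s in s2` loop body
def solStepA (d : PySem.Dict Char Int) (c : Char) : PySem.Dict Char Int :=
  if d.contains c then
    let d1 := d.insert c (d.getD c 0 - 1)          -- H1[s] -= 1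
    if d1.getD c 0 = 0 then d1.erase c else d1     -- if H1[s] == 0: del H1[s]
  else d

def solution (s1 : String) (s2 : String) : String :=
  let H1 := PySem.Dict.counter s1.toList
  let H := s2.toList.foldl solStepA H1
  if H.items.isEmpty then "TES" else "NO"          -- if not H1: "TES" else "NO"

-- ===== PORT B =====
def solution_alt (s1 : String) (s2 : String) : String :=
  let c1 := PySem.Dict.counter s1.toList
  let c2 := PySem.Dict.counter s2.toList
  if c1.items.all (fun p => p.2 ≤ c2.getD p.1 0) then "TES" else "NO"

-- ===== PRECONDITION & SPEC =====
def Spec_solution (s1 : String) (s2 : String) (out : String) : Prop := out = solution_alt s1 s2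
instance (s1 : String) (s2 : String) (out : String) : Decidable (Spec_solution s1 s2 out) := by unfold Spec_solution; infer_instance

-- ===== CLAIM (what is proved, stated in full; the proofs are below) =====
def Claim_equal_solution : Prop := ∀ (s1 : String) (s2 : String), Dom_solution s1 s2 → Spec_solution s1 s2 (solution s1 s2)

-- ===== LEMMAS AND PROOFS =====

-- rewriting then filtering away the key c is the same as just filtering it away
lemma solFilterMap (l : List (Char × Int)) (c : Char) (w : Int) :
    (l.map (fun p => if p.1 == c then (c, w) else p)).filter (fun p => !(p.1 == c))
      = l.filter (fun p => !(p.1 == c)) := by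
  induction l with
  | nil => rfl
  | cons q l ih =>
    by_cases h : q.1 = c <;> simpa [h] using ih

-- A's loop ends with an empty dict iff every (still pending) entry is covered by the rest of s2
lemma solLoopEmpty (t : List Char) :
    ∀ (d : PySem.Dict Char Int), d.keys.Nodup → (∀ p ∈ d.items, 0 < p.2) →
      ((t.foldl solStepA d).items = [] ↔ ∀ p ∈ d.items, p.2 ≤ (t.count p.1 : Int)) := by
  induction t with
  | nil =>
    intro d _ hpos
    simp only [List.foldl_nil, List.count_nil]
    constructor
    · intro h p hp; rw [h] at hp; simp at hp
    · intro h
      rcases List.eq_nil_or_concat d.items with h0 | ⟨l, p, h0⟩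
      · exact h0
      · exfalso
        have hp : p ∈ d.items := by rw [h0]; simp
        have := h p hp; have := hpos p hp; omega
  | cons c t ih =>
    intro d hnd hpos
    rw [List.foldl_cons]
    have hcnt : ∀ k : Char, (List.count k (c :: t) : Int)
        = (List.count k t : Int) + (if k = c then 1 else 0) := by
      intro k; rw [List.count_cons]
      by_cases h : k = c
      · simp [h]
      · have h' : ¬c = k := fun hh => h hh.symm
        simp [h, h']
    by_cases hc : d.contains c = true
    · -- c is in the dict: decrement, maybe delete
      have hg : 0 < d.getD c 0 := by
        have hk : c ∈ d.keys := (PySem.Dict.contains_iff_mem_keys d c).mp hc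
        simp only [PySem.Dict.keys, List.mem_map] at hk
        obtain ⟨p, hp, hp1⟩ := hk
        have := PySem.Dict.getD_of_mem_items d (k := p.1) (v := p.2) hp hnd 0
        rw [hp1] at this; rw [this]; exact hpos p hp
      have hitems1 : (d.insert c (d.getD c 0 - 1)).items
          = d.items.map (fun p => if p.1 == c then (c, d.getD c 0 - 1) else p) :=
        PySem.Dict.items_insert_of_contains d _ hc
      have hgd1 : (d.insert c (d.getD c 0 - 1)).getD c 0 = d.getD c 0 - 1 :=
        PySem.Dict.getD_insert_self d c _ 0
      -- a key-c entry of d.items carries exactly the value getD c 0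
      have hval : ∀ p ∈ d.items, p.1 = c → p.2 = d.getD c 0 := by
        intro p hp h1
        have := PySem.Dict.getD_of_mem_items d (k := p.1) (v := p.2) hp hnd 0
        rw [h1] at this; omega
      by_cases hz : d.getD c 0 - 1 = 0
      · -- the count hits zero: the entry is deleted
        have hstep : solStepA d c = (d.insert c (d.getD c 0 - 1)).erase c := by
          simp only [solStepA, hc, if_true]
          rw [hgd1, if_pos hz]
        rw [hstep]
        have herase : ((d.insert c (d.getD c 0 - 1)).erase c).items
            = d.items.filter (fun p => !(p.1 == c)) := by
          rw [PySem.Dict.erase.eq_def, hitems1]; exact solFilterMap _ _ _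
        have hnd' : ((d.insert c (d.getD c 0 - 1)).erase c).keys.Nodup := by
          simp only [PySem.Dict.keys, herase]
          exact List.Nodup.sublist (List.filter_sublist.map _) hnd
        have hpos' : ∀ p ∈ ((d.insert c (d.getD c 0 - 1)).erase c).items, 0 < p.2 := by
          intro p hp; rw [herase] at hp
          exact hpos p (List.mem_of_mem_filter hp)
        rw [ih _ hnd' hpos', herase]
        constructor
        · intro h p hp
          rw [hcnt]
          by_cases h1 : p.1 = c
          · have h2 := hval p hp h1
            simp [h1]; omega
          · have := h p (by rw [List.mem_filter]; exact ⟨hp, by simp [h1]⟩)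
            simp [h1]; omega
        · intro h p hp
          rw [List.mem_filter] at hp
          obtain ⟨hp, h1⟩ := hp
          have h1 : p.1 ≠ c := by simpa using h1
          have := h p hp
          rw [hcnt] at this; simp [h1] at this; omega
      · -- the count stays positive: the entry is rewritten
        have hstep : solStepA d c = d.insert c (d.getD c 0 - 1) := by
          simp only [solStepA, hc, if_true]
          rw [hgd1, if_neg hz]
        rw [hstep]
        have hnd' : (d.insert c (d.getD c 0 - 1)).keys.Nodup :=
          PySem.Dict.nodup_keys_insert d _ _ hnd
        have hpos' : ∀ p ∈ (d.insert c (d.getD c 0 - 1)).items, 0 < p.2 := by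
          intro p hp; rw [hitems1, List.mem_map] at hp
          obtain ⟨q, hq, hfq⟩ := hp
          rw [← hfq]
          by_cases h1 : q.1 = c
          · simp [h1]; omega
          · simp [h1]; exact hpos q hq
        rw [ih _ hnd' hpos', hitems1]
        simp only [List.forall_mem_map]
        constructor
        · intro h p hp
          have hfp := h p hp
          rw [hcnt]
          by_cases h1 : p.1 = c
          · have h2 := hval p hp h1
            simp [h1] at hfp ⊢; omega
          · simp [h1] at hfp ⊢; omega
        · intro h p hp
          have hcp := h p hp
          rw [hcnt] at hcp
          by_cases h1 : p.1 = c
          · have h2 := hval p hp h1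
            simp [h1] at hcp ⊢; omega
          · simp [h1] at hcp ⊢; omega
    · -- c not in the dict: the step is a no-op
      have hstep : solStepA d c = d := by simp [solStepA, hc]
      have hne : ∀ p ∈ d.items, p.1 ≠ c := by
        intro p hp h1
        apply hc
        rw [PySem.Dict.contains_iff_mem_keys]
        simp only [PySem.Dict.keys, List.mem_map]
        exact ⟨p, hp, h1⟩
      rw [hstep, ih _ hnd hpos]
      constructor
      · intro h p hp
        have := h p hp
        rw [hcnt]; simp [hne p hp]; omega
      · intro h p hp
        have := h p hp
        rw [hcnt] at this; simp [hne p hp] at this; omega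

-- ===== VERDICT (by name: the statement is the Claim_ definition above) =====
theorem solution_spec : Claim_equal_solution := by
  intro s1 s2 _
  unfold Spec_solution
  have hkey := solLoopEmpty s2.toList (PySem.Dict.counter s1.toList)
    (PySem.Dict.nodup_keys_counter _)
    (by
      intro p hp
      rw [PySem.Dict.items_counter, List.mem_map] at hp
      obtain ⟨k, hk, hkp⟩ := hp
      rw [PySem.Set.mem_ofList] at hk
      rw [← hkp]
      have := List.count_pos_iff.mpr hk
      simp; omega)
  have hcond : (s2.toList.foldl solStepA (PySem.Dict.counter s1.toList)).items.isEmpty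
      = ((PySem.Dict.counter s1.toList).items.all
          (fun p => p.2 ≤ (PySem.Dict.counter s2.toList).getD p.1 0)) := by
    apply Bool.coe_iff_coe.mp
    rw [List.isEmpty_iff, hkey]
    simp only [List.all_eq_true, PySem.Dict.getD_counter, decide_eq_true_eq]
  simp only [solution, solution_alt]
  rw [hcond]
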